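-- pv_equiv track=rewrite | github.com/yuleiqin/fopro | utils/low_quality_filter.py | split_by_num_process
-- ===== SOURCE A (Python) =====
-- def split_by_num_process(items_to_split, N_threads):
--     """splits the items into N subsequences evenly"""
--     num_each_split = len(items_to_split) // N_threads
--     # remain_split = len(items_to_split) % N_threads
--     nums_split = [[] for _ in range(N_threads)]
--     for idx, item_to_split in enumerate(items_to_split):
--         if num_each_split != 0:
--             idx_split = idx // num_each_split
--             if idx_split >= N_threads:
--                 idx_split = idx % N_threads
--         else:
--             idx_split = idx % N_threads
--         nums_split[idx_split].append(item_to_split)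
--     nums_split = [num_split for num_split in nums_split if len(num_split) > 0]
--     return nums_split
-- ===== SOURCE B (Python) =====
-- def split_by_num_process(items_to_split, N_threads):
--     """splits the items into N subsequences evenly"""
--     base = len(items_to_split) // N_threads
--     buckets = [list(items_to_split[k * base:(k + 1) * base]) for k in range(N_threads)]
--     rem = items_to_split[N_threads * base:]
--     for i, x in enumerate(rem):
--         buckets[i].append(x)
--     return [b for b in buckets if b]
-- ===== Notes on version B (the rewrite author's own statement) =====
-- stated objective: simpler
-- what changed: B builds the first N buckets directly as consecutive slices items[k*base:(k+1)*base] and then appends the leftover tail items one per bucket, replacing A's per-item floor-division/modulo bucket-index computation inside the loop.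
import Mathlib
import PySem

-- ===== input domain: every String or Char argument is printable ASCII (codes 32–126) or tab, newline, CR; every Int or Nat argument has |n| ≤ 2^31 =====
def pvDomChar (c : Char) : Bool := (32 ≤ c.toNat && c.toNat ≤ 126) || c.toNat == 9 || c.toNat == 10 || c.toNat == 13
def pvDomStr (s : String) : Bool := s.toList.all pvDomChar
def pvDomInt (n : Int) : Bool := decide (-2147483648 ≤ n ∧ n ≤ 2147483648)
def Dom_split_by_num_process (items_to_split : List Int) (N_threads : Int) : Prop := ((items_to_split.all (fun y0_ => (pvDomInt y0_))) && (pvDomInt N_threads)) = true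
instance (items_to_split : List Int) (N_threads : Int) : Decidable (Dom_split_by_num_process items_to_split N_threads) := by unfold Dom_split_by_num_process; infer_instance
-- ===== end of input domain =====

-- B builds the buckets as closed-form slices plus a remainder pass instead of A's per-item
-- division/modulo bucket assignment; objective: simpler (same O(n) cost).


-- ===== PORT A =====
-- literal transliteration of A: per-item bucket index by floor-division / modulo, then drop empties
def split_by_num_process (items_to_split : List Int) (N_threads : Int) : List (List Int) :=
  let num_each_split : Int := PySem.Int.floordiv (items_to_split.length : Int) N_threads
  let nums_split : List (List Int) := List.replicate N_threads.toNat []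
  -- for idx, item in enumerate(items): nums_split[idx_split].append(item)
  -- (inside Pre_ the computed index is always in range; out of range Python raises IndexError,
  -- which only happens outside Pre_, where List.modify's no-op is never relied upon)
  let nums_split := (items_to_split.zipIdx).foldl (fun acc p =>
      let idx_split : Int :=
        if num_each_split ≠ 0 then
          let q := PySem.Int.floordiv ((p.2 : Nat) : Int) num_each_split
          if N_threads ≤ q then PySem.Int.mod ((p.2 : Nat) : Int) N_threads else q
        else PySem.Int.mod ((p.2 : Nat) : Int) N_threads
      acc.modify idx_split.toNat (fun b => b ++ [p.1])) nums_split
  nums_split.filter (fun b => decide (0 < b.length))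

-- ===== PORT B =====
-- literal transliteration of B: consecutive slices of size len//N, remainder appended bucket-by-bucket
def split_by_num_process_alt (items_to_split : List Int) (N_threads : Int) : List (List Int) :=
  let base : Int := PySem.Int.floordiv (items_to_split.length : Int) N_threads
  let buckets : List (List Int) :=
    (PySem.List.pyRange 0 N_threads).map
      (fun k => PySem.List.slice items_to_split (some (k * base)) (some ((k + 1) * base)))
  let rem : List Int := PySem.List.slice items_to_split (some (N_threads * base)) none
  let buckets := rem.zipIdx.foldl (fun acc p => acc.modify p.2 (fun b => b ++ [p.1])) buckets
  buckets.filter (fun b => !b.isEmpty)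

-- ===== PRECONDITION & SPEC =====
-- Pre_ excludes exactly the inputs where A raises: N_threads = 0 (ZeroDivisionError) and
-- N_threads < 0 with a nonempty list (IndexError on the empty bucket list).
def Pre_split_by_num_process (items_to_split : List Int) (N_threads : Int) : Prop :=
  1 ≤ N_threads ∨ (items_to_split = [] ∧ N_threads < 0)
instance (items_to_split : List Int) (N_threads : Int) : Decidable (Pre_split_by_num_process items_to_split N_threads) := by unfold Pre_split_by_num_process; infer_instance
def pvWitness_split_by_num_process : List Int × Int := ([1, 2, 3, 4, 5], 2)

def Spec_split_by_num_process (items_to_split : List Int) (N_threads : Int) (out : List (List Int)) : Prop := out = split_by_num_process_alt items_to_split N_threads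
instance (items_to_split : List Int) (N_threads : Int) (out : List (List Int)) : Decidable (Spec_split_by_num_process items_to_split N_threads out) := by unfold Spec_split_by_num_process; infer_instance

-- ===== CLAIM (what is proved, stated in full; the proofs are below) =====
def Claim_equal_split_by_num_process : Prop := ∀ (items_to_split : List Int) (N_threads : Int), Dom_split_by_num_process items_to_split N_threads → Pre_split_by_num_process items_to_split N_threads → Spec_split_by_num_process items_to_split N_threads (split_by_num_process items_to_split N_threads)

-- ===== LEMMAS AND PROOFS =====

-- A's per-item bucket index, named for the proofs (definitionally the port's loop body expression)
def aIdx (num_each_split N_threads : Int) (k : Nat) : Nat :=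
  (if num_each_split ≠ 0 then
     let q := PySem.Int.floordiv ((k : Nat) : Int) num_each_split
     if N_threads ≤ q then PySem.Int.mod ((k : Nat) : Int) N_threads else q
   else PySem.Int.mod ((k : Nat) : Int) N_threads).toNat

-- distributing a fold of "append element p.1 to bucket g p.2" over the bucket list
lemma foldl_modify_append (g : Nat → Nat) (f : List (List Int) → (Int × Nat) → List (List Int))
    (hf : ∀ acc p, f acc p = acc.modify (g p.2) (fun b => b ++ [p.1])) :
    ∀ (xs : List (Int × Nat)) (bs : List (List Int)),
      xs.foldl f bs
        = bs.mapIdx (fun j b => b ++ (xs.filter (fun p => g p.2 == j)).map Prod.fst)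
  | [], bs => by
      apply List.ext_getElem
      · simp
      · intro i h1 h2; simp [List.getElem_mapIdx]
  | x :: xs, bs => by
      simp only [List.foldl_cons, hf]
      rw [foldl_modify_append g f hf xs]
      apply List.ext_getElem
      · simp
      · intro i h1 h2
        simp only [List.getElem_mapIdx, List.getElem_modify, List.filter_cons]
        by_cases hgi : g x.2 = i
        · simp [hgi, List.append_assoc]
        · simp [hgi, beq_iff_eq]

-- filtering an index-zipped list for one index yields that element
lemma zipIdx_filter_eq_idx {α : Type} : ∀ (ys : List α) (k j : Nat), k ≤ j →
    ((ys.zipIdx k).filter (fun p => p.2 == j)).map Prod.fst = (ys[j - k]?).toList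
  | [], k, j, h => by simp
  | y :: ys, k, j, h => by
      simp only [List.zipIdx_cons, List.filter_cons]
      by_cases hkj : k = j
      · subst hkj
        have hnil : (ys.zipIdx (k + 1)).filter (fun p => p.2 == k) = [] := by
          rw [List.filter_eq_nil_iff]
          rintro ⟨a, i⟩ hmem
          have := List.mem_zipIdx hmem
          simp only [beq_iff_eq]
          omega
        simp [hnil]
      · have hk1 : k + 1 ≤ j := by omega
        have hjk : j - k = (j - (k + 1)) + 1 := by omega
        rw [hjk]
        simp only [beq_iff_eq, hkj, if_false]
        rw [zipIdx_filter_eq_idx ys (k + 1) j hk1]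
        simp

-- filtering an index-zipped list for an index interval yields the corresponding drop/take
lemma zipIdx_filter_interval {α : Type} : ∀ (ys : List α) (k c d : Nat), k ≤ c →
    ((ys.zipIdx k).filter (fun p => decide (c ≤ p.2 ∧ p.2 < d))).map Prod.fst
      = (ys.drop (c - k)).take (d - c)
  | [], k, c, d, h => by simp
  | y :: ys, k, c, d, h => by
      simp only [List.zipIdx_cons, List.filter_cons]
      by_cases hk : c ≤ k ∧ k < d
      · have hck : c = k := le_antisymm hk.1 h
        subst hck
        have htail : (ys.zipIdx (c + 1)).filter (fun p => decide (c ≤ p.2 ∧ p.2 < d))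
            = (ys.zipIdx (c + 1)).filter (fun p => decide (c + 1 ≤ p.2 ∧ p.2 < d)) := by
          apply List.filter_congr
          rintro ⟨a, i⟩ hmem
          have := List.mem_zipIdx hmem
          simp only [decide_eq_decide]
          omega
        have hd : d - c = (d - (c + 1)) + 1 := by omega
        rw [if_pos (by simpa using hk), hd]
        simp only [List.map_cons]
        rw [htail, zipIdx_filter_interval ys (c + 1) (c + 1) d (le_refl _)]
        simp
      · by_cases hkc : k < c
        · have hck : c - k = (c - (k + 1)) + 1 := by omega
          rw [if_neg (by simp; omega), hck]
          rw [zipIdx_filter_interval ys (k + 1) c d (by omega)]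
          simp
        · have hdc : d - c = 0 := by omega
          have hnil : (ys.zipIdx (k + 1)).filter (fun p => decide (c ≤ p.2 ∧ p.2 < d)) = [] := by
            rw [List.filter_eq_nil_iff]
            rintro ⟨a, i⟩ hmem
            have := List.mem_zipIdx hmem
            simp only [decide_eq_true_eq]
            omega
          rw [if_neg (by simp; omega), hdc, hnil]
          simp
  termination_by ys => ys.length

-- A's bucket index in Nat terms
lemma aIdx_natCast (b N' k : Nat) :
    aIdx ((b : Nat) : Int) ((N' : Nat) : Int) k
      = if b ≠ 0 then (if N' ≤ k / b then k % N' else k / b) else k % N' := by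
  simp only [aIdx, PySem.Int.floordiv_natCast, PySem.Int.mod_natCast]
  simp only [apply_ite Int.toNat, ne_eq, Nat.cast_eq_zero, Nat.cast_le, Int.toNat_natCast]

-- content of A's bucket j, as a slice plus the j-th remainder element
lemma bucket_eq (items : List Int) (N' j : Nat) (hN : 0 < N') (hj : j < N') :
    ((items.zipIdx).filter (fun p =>
        (if items.length / N' ≠ 0
           then (if N' ≤ p.2 / (items.length / N') then p.2 % N' else p.2 / (items.length / N'))
           else p.2 % N') == j)).map Prod.fst
      = (items.drop (j * (items.length / N'))).take (items.length / N')
          ++ ((items.drop (N' * (items.length / N')))[j]?).toList := by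
  set n := items.length with hn
  set b := n / N' with hb
  have hbn : N' * b ≤ n := by rw [mul_comm]; exact Nat.div_mul_le_self n N'
  have hsplit : items = items.take (N' * b) ++ items.drop (N' * b) := (List.take_append_drop _ _).symm
  conv_lhs => rw [hsplit]
  rw [List.zipIdx_append, List.filter_append, List.map_append]
  have hlen : (items.take (N' * b)).length = N' * b := by
    rw [List.length_take, ← hn]; omega
  congr 1
  · -- the slice part
    by_cases hb0 : b = 0
    · simp [hb0]
    · have hbpos : 0 < b := Nat.pos_of_ne_zero hb0
      have hcong : ((items.take (N' * b)).zipIdx 0).filter (fun p =>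
            (if b ≠ 0 then (if N' ≤ p.2 / b then p.2 % N' else p.2 / b) else p.2 % N') == j)
          = ((items.take (N' * b)).zipIdx 0).filter
              (fun p => decide (j * b ≤ p.2 ∧ p.2 < (j + 1) * b)) := by
        apply List.filter_congr
        rintro ⟨a, i⟩ hmem
        have hm := List.mem_zipIdx hmem
        rw [hlen] at hm
        have hdiv : i / b < N' := (Nat.div_lt_iff_lt_mul hbpos).mpr (by omega)
        rw [if_pos hb0, if_neg (by omega : ¬ N' ≤ i / b), Bool.eq_iff_iff]
        simp only [beq_iff_eq, decide_eq_true_eq]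
        rw [Nat.div_eq_iff hbpos, Nat.add_one_mul]
        omega
      rw [hcong, zipIdx_filter_interval _ 0 (j * b) ((j + 1) * b) (Nat.zero_le _)]
      simp only [Nat.sub_zero]
      rw [List.drop_take, List.take_take]
      have e1 : (j + 1) * b = j * b + b := Nat.add_one_mul j b
      have e2 : (j + 1) * b ≤ N' * b := Nat.mul_le_mul_right b (by omega)
      congr 1
      omega
  · -- the remainder part
    have hmod := Nat.div_add_mod n N'
    rw [← hb] at hmod
    have hrlt : n % N' < N' := Nat.mod_lt n hN
    have hofflen : 0 + (items.take (N' * b)).length = N' * b := by rw [hlen]; omega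
    rw [hofflen]
    have hcong : ((items.drop (N' * b)).zipIdx (N' * b)).filter (fun p =>
          (if b ≠ 0 then (if N' ≤ p.2 / b then p.2 % N' else p.2 / b) else p.2 % N') == j)
        = ((items.drop (N' * b)).zipIdx (N' * b)).filter (fun p => p.2 == N' * b + j) := by
      apply List.filter_congr
      rintro ⟨a, i⟩ hmem
      have hm := List.mem_zipIdx hmem
      have hdlen : (items.drop (N' * b)).length = n - N' * b := by
        rw [List.length_drop, ← hn]
      rw [hdlen] at hm
      obtain ⟨t, ht⟩ : ∃ t, i = N' * b + t := ⟨i - N' * b, by omega⟩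
      have htlt : t < N' := by omega
      have hmodi : i % N' = t := by
        rw [ht, Nat.mul_add_mod]
        exact Nat.mod_eq_of_lt htlt
      have hpred : (if b ≠ 0 then (if N' ≤ i / b then i % N' else i / b) else i % N') = i % N' := by
        by_cases hb0 : b = 0
        · simp [hb0]
        · have hbpos : 0 < b := Nat.pos_of_ne_zero hb0
          have : N' ≤ i / b := (Nat.le_div_iff_mul_le hbpos).mpr (by omega)
          simp [hb0, this]
      rw [hpred, Bool.eq_iff_iff]
      simp only [beq_iff_eq]
      omega
    rw [hcong, zipIdx_filter_eq_idx _ (N' * b) (N' * b + j) (by omega),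
      Nat.add_sub_cancel_left]

-- the two programs agree for every positive thread count
lemma main_pos (items : List Int) (N' : Nat) (hN : 0 < N') :
    split_by_num_process items ((N' : Nat) : Int) = split_by_num_process_alt items ((N' : Nat) : Int) := by
  rw [show split_by_num_process items ((N' : Nat) : Int)
      = ((items.zipIdx).foldl
          (fun acc p => acc.modify
            (aIdx (PySem.Int.floordiv (items.length : Int) ((N' : Nat) : Int)) ((N' : Nat) : Int) p.2)
            (fun b => b ++ [p.1]))
          (List.replicate ((N' : Nat) : Int).toNat [])).filter (fun b => decide (0 < b.length))
      from rfl]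
  rw [show split_by_num_process_alt items ((N' : Nat) : Int)
      = (((PySem.List.slice items
            (some (((N' : Nat) : Int) * PySem.Int.floordiv (items.length : Int) ((N' : Nat) : Int)))
            none).zipIdx).foldl
          (fun acc p => acc.modify ((fun k : Nat => k) p.2) (fun b => b ++ [p.1]))
          ((PySem.List.pyRange 0 ((N' : Nat) : Int)).map
            (fun k => PySem.List.slice items
              (some (k * PySem.Int.floordiv (items.length : Int) ((N' : Nat) : Int)))
              (some ((k + 1) * PySem.Int.floordiv (items.length : Int) ((N' : Nat) : Int)))))).filter
          (fun b => !b.isEmpty)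
      from rfl]
  rw [foldl_modify_append _ _ (fun _ _ => rfl), foldl_modify_append (fun k : Nat => k) _ (fun _ _ => rfl)]
  rw [show (fun b : List Int => !b.isEmpty) = (fun b : List Int => decide (0 < b.length)) from by
    funext b; cases b <;> simp]
  refine congrArg (List.filter _) ?_
  have hlen : ((PySem.List.pyRange 0 ((N' : Nat) : Int)).map
      (fun k => PySem.List.slice items
        (some (k * PySem.Int.floordiv (items.length : Int) ((N' : Nat) : Int)))
        (some ((k + 1) * PySem.Int.floordiv (items.length : Int) ((N' : Nat) : Int))))).length = N' := by
    rw [PySem.List.pyRange_zero_natCast]; simp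
  apply List.ext_getElem
  · simp
  · intro j h1 h2
    have hj : j < N' := by simpa [hlen] using h2
    simp only [List.getElem_mapIdx, List.getElem_replicate, List.nil_append]
    -- the j-th initial bucket of B is the j-th slice
    simp only [PySem.List.pyRange_zero_natCast, List.map_map, List.getElem_map,
      List.getElem_range]
    simp only [Function.comp_apply, PySem.Int.floordiv_natCast]
    rw [show ((j : Nat) : Int) * ((items.length / N' : Nat) : Int)
        = ((j * (items.length / N') : Nat) : Int) from by push_cast; ring]
    rw [show (((j : Nat) : Int) + 1) * ((items.length / N' : Nat) : Int)
        = ((j * (items.length / N') : Nat) : Int) + ((items.length / N' : Nat) : Int) from by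
      push_cast; ring]
    rw [PySem.List.slice_natCast_add]
    rw [show ((N' : Nat) : Int) * ((items.length / N' : Nat) : Int)
        = ((N' * (items.length / N') : Nat) : Int) from by push_cast; ring]
    rw [PySem.List.slice_from_natCast]
    rw [zipIdx_filter_eq_idx _ 0 j (Nat.zero_le j), Nat.sub_zero]
    simp only [aIdx_natCast]
    exact bucket_eq items N' j hN hj

-- ===== VERDICT (by name: the statement is the Claim_ definition above) =====
theorem split_by_num_process_spec : Claim_equal_split_by_num_process := by
  intro items N _hdom hpre
  unfold Spec_split_by_num_process
  rcases hpre with hN | ⟨hnil, hneg⟩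
  · obtain ⟨N', rfl⟩ : ∃ N'' : Nat, N = ((N'' : Nat) : Int) :=
      ⟨N.toNat, (Int.toNat_of_nonneg (by omega)).symm⟩
    exact main_pos items N' (by exact_mod_cast hN)
  · subst hnil
    have hA : split_by_num_process [] N = [] := by
      simp [split_by_num_process, show N.toNat = 0 from by omega]
    have hB : split_by_num_process_alt [] N = [] := by
      simp [split_by_num_process_alt, PySem.List.slice]
    rw [hA, hB]
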